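-- pv_equiv track=rewrite | github.com/danmazus/FCM | my_package/functions_storage.py | UL_mult_COMB
-- ===== SOURCE A (Python) =====
-- def UL_mult_COMB(LU, n):
--     M = [[0] * n for i in range(n)]
--     #for i in range(n):
--      #   for k in range(i, n):
--       #      M[i][k] = LU[i][k]
--
--     #or i in range(n):
--        # for k in range(n):
--           #  upper_limit = min(i, k + 1)
--           #  for j in range(upper_limit):
--              #   M[i][k] += LU[i][j] * LU[j][k]
--
--     for i in range(n):
--         for k in range(n):
--             if i == k:
--                 # Diagonal Case
--                 M[i][k] += LU[i][k]
--                 for j in range(i):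
--                     M[i][k] += LU[i][j] * LU[j][k]
--             elif i > k:
--                 # Lower Triangular Part
--                 for j in range(k + 1):
--                     M[i][k] += LU[i][j] * LU[j][k]
--             else:
--                 # i < k, Upper Triangular Part
--                 M[i][k] += LU[i][k]
--                 for j in range(i):
--                       M[i][k] += LU[i][j] * LU[j][k]
--     return M
-- ===== SOURCE B (Python) =====
-- def UL_mult_COMB(LU, n):
--     # Unpack the packed factors into explicit full matrices:
--     # L is unit lower triangular, U is upper triangular.
--     L = [[LU[i][j] if j < i else (1 if j == i else 0) for j in range(n)]
--          for i in range(n)]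
--     U = [[LU[i][j] if j >= i else 0 for j in range(n)]
--          for i in range(n)]
--     # Generic dense matrix product M = L @ U.
--     return [[sum(L[i][j] * U[j][k] for j in range(n)) for k in range(n)]
--             for i in range(n)]
-- ===== Notes on version B (the rewrite author's own statement) =====
-- stated objective: alternative
-- what changed: Instead of triangular branch-based accumulation into a mutated matrix, B first unpacks the packed storage into explicit full L (unit lower triangular) and U (upper triangular) matrices and then computes a generic dense matrix product L @ U with a uniform full-range inner loop.
import Mathlib
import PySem

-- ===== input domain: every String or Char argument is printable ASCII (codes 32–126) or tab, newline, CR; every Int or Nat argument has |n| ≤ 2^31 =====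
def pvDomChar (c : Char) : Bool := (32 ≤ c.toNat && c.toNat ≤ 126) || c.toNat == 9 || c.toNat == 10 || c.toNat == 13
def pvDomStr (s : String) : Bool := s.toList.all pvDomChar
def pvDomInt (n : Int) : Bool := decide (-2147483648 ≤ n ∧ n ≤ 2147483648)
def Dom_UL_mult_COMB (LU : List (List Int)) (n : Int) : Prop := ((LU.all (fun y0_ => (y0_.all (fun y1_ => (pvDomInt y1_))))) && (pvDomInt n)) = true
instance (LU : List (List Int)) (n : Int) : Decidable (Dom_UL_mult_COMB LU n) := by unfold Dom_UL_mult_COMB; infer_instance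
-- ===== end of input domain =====

-- B unpacks the packed storage into explicit full L and U matrices and computes a
-- generic dense matrix product L @ U, instead of A's branch-based triangular
-- accumulation into a mutated matrix (objective: alternative).

-- ===== PORT A =====
-- shared indexing helpers: LU[i][k] (read), M[i][k] = v (write);
-- all indices come from range(n) so they are nonnegative; pyGetD/pySetD are exact under Pre_
def pvGet2 (LU : List (List Int)) (i k : Int) : Int :=
  PySem.List.pyGetD (PySem.List.pyGetD LU i []) k 0

def pvMset (M : List (List Int)) (i k : Int) (v : Int) : List (List Int) :=
  PySem.List.pySetD M i (PySem.List.pySetD (PySem.List.pyGetD M i []) k v)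

def pvAbody (LU : List (List Int)) (i k : Int) (M : List (List Int)) : List (List Int) :=
  if i = k then
    (PySem.List.pyRange 0 i 1).foldl
      (fun M j => pvMset M i k (pvGet2 M i k + pvGet2 LU i j * pvGet2 LU j k))
      (pvMset M i k (pvGet2 M i k + pvGet2 LU i k))
  else if k < i then
    (PySem.List.pyRange 0 (k + 1) 1).foldl
      (fun M j => pvMset M i k (pvGet2 M i k + pvGet2 LU i j * pvGet2 LU j k)) M
  else
    (PySem.List.pyRange 0 i 1).foldl
      (fun M j => pvMset M i k (pvGet2 M i k + pvGet2 LU i j * pvGet2 LU j k))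
      (pvMset M i k (pvGet2 M i k + pvGet2 LU i k))

def UL_mult_COMB (LU : List (List Int)) (n : Int) : List (List Int) :=
  (PySem.List.pyRange 0 n 1).foldl
    (fun M i => (PySem.List.pyRange 0 n 1).foldl (fun M k => pvAbody LU i k M) M)
    ((PySem.List.pyRange 0 n 1).map (fun _ => PySem.List.pyRepeat [(0 : Int)] n))

-- ===== PORT B =====
-- L = unit lower triangular unpacking, U = upper triangular unpacking, then M = L @ U
def pvUnpackL (LU : List (List Int)) (n : Int) : List (List Int) :=
  (PySem.List.pyRange 0 n 1).map (fun i =>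
    (PySem.List.pyRange 0 n 1).map (fun j =>
      if j < i then pvGet2 LU i j else if j = i then 1 else 0))

def pvUnpackU (LU : List (List Int)) (n : Int) : List (List Int) :=
  (PySem.List.pyRange 0 n 1).map (fun i =>
    (PySem.List.pyRange 0 n 1).map (fun j =>
      if i ≤ j then pvGet2 LU i j else 0))

def UL_mult_COMB_alt (LU : List (List Int)) (n : Int) : List (List Int) :=
  let L := pvUnpackL LU n
  let U := pvUnpackU LU n
  (PySem.List.pyRange 0 n 1).map (fun i =>
    (PySem.List.pyRange 0 n 1).map (fun k =>
      ((PySem.List.pyRange 0 n 1).map (fun j => pvGet2 L i j * pvGet2 U j k)).sum))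

-- ===== PRECONDITION & SPEC =====
-- Pre_: exactly where Python A returns: n <= 0 (empty result), or the first n rows of LU
-- exist and each has at least n entries (otherwise A raises IndexError reading LU)
def Pre_UL_mult_COMB (LU : List (List Int)) (n : Int) : Prop :=
  n ≤ 0 ∨ (n ≤ (LU.length : Int) ∧ ∀ row ∈ LU.take n.toNat, n ≤ (row.length : Int))
instance (LU : List (List Int)) (n : Int) : Decidable (Pre_UL_mult_COMB LU n) := by
  unfold Pre_UL_mult_COMB; infer_instance

def pvWitness_UL_mult_COMB : List (List Int) × Int := ([[2, 3], [4, 5]], 2)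

def Spec_UL_mult_COMB (LU : List (List Int)) (n : Int) (out : List (List Int)) : Prop :=
  out = UL_mult_COMB_alt LU n
instance (LU : List (List Int)) (n : Int) (out : List (List Int)) :
    Decidable (Spec_UL_mult_COMB LU n out) := by unfold Spec_UL_mult_COMB; infer_instance

-- ===== CLAIM (what is proved, stated in full; the proofs are below) =====
def Claim_equal_UL_mult_COMB : Prop := ∀ (LU : List (List Int)) (n : Int),
  Dom_UL_mult_COMB LU n → Pre_UL_mult_COMB LU n →
  Spec_UL_mult_COMB LU n (UL_mult_COMB LU n)

-- ===== LEMMAS AND PROOFS =====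
-- Nat-indexed views of the entries and of the in-place update, plus the closed-form
-- entry value pvVal that both programs compute

def pvGetN (M : List (List Int)) (i k : Nat) : Int := (M.getD i []).getD k 0

def pvVal (LU : List (List Int)) (i k : Nat) : Int :=
  (if i ≤ k then pvGetN LU i k else 0) +
  ((List.range (min i (k + 1))).map (fun j => pvGetN LU i j * pvGetN LU j k)).sum

def pvSetN (M : List (List Int)) (i k : Nat) (v : Int) : List (List Int) :=
  M.set i ((M.getD i []).set k v)

def pvShape (N : Nat) (M : List (List Int)) : Prop :=
  M.length = N ∧ ∀ r ∈ M, r.length = N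

def pvRowF (LU : List (List Int)) (N i : Nat) (r : List Int) : List Int :=
  (List.range N).foldl (fun r k => r.set k (r.getD k 0 + pvVal LU i k)) r

lemma pvRangeNat (n : Int) :
    PySem.List.pyRange 0 n 1 = (List.range n.toNat).map (fun (k : Nat) => (k : Int)) := by
  rw [PySem.List.pyRange_one]; simp

@[simp] lemma pvGet2_cast (LU : List (List Int)) (i k : Nat) :
    pvGet2 LU (i : Int) (k : Int) = pvGetN LU i k := by simp [pvGet2, pvGetN]

@[simp] lemma pvMset_cast (M : List (List Int)) (i k : Nat) (v : Int) :
    pvMset M (i : Int) (k : Int) v = pvSetN M i k v := by simp [pvMset, pvSetN]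

lemma pvSetN_length (M : List (List Int)) (i k : Nat) (v : Int) :
    (pvSetN M i k v).length = M.length := by simp [pvSetN]

lemma pvSetN_getD_self (M : List (List Int)) (i k : Nat) (v : Int) (hi : i < M.length) :
    (pvSetN M i k v).getD i [] = (M.getD i []).set k v := by
  simp [pvSetN, List.getD_eq_getElem?_getD, List.getElem?_set_self hi]

lemma pvGetN_setN_self (M : List (List Int)) (i k : Nat) (v : Int)
    (hi : i < M.length) (hk : k < (M.getD i []).length) :
    pvGetN (pvSetN M i k v) i k = v := by
  simp only [pvGetN, pvSetN, List.getD_eq_getElem?_getD, List.getElem?_set_self hi, Option.getD_some]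
  rw [List.getElem?_set_self (by simpa [List.getD_eq_getElem M [] hi] using hk)]; rfl

lemma pvSetN_setN (M : List (List Int)) (i k : Nat) (v w : Int) :
    pvSetN (pvSetN M i k v) i k w = pvSetN M i k w := by
  by_cases hi : i < M.length
  · simp [pvSetN, List.getD_eq_getElem?_getD, List.getElem?_set_self hi, List.set_set]
  · simp [pvSetN, List.set_eq_of_length_le (by omega : M.length ≤ i)]

lemma pvSetN_self (M : List (List Int)) (i k : Nat)
    (hi : i < M.length) (hk : k < (M.getD i []).length) :
    pvSetN M i k (pvGetN M i k) = M := by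
  unfold pvSetN pvGetN
  rw [List.getD_eq_getElem _ 0 hk, List.set_getElem_self]
  rw [List.getD_eq_getElem _ [] hi, List.set_getElem_self]

lemma pvShape_setN (N : Nat) (M : List (List Int)) (i k : Nat) (v : Int)
    (h : pvShape N M) (hi : i < N) : pvShape N (pvSetN M i k v) := by
  obtain ⟨h1, h2⟩ := h
  refine ⟨by simp [pvSetN, h1], fun r hr => ?_⟩
  rcases List.mem_or_eq_of_mem_set hr with hr' | rfl
  · exact h2 r hr'
  · rw [List.length_set]
    rw [List.getD_eq_getElem M [] (by omega)]
    exact h2 _ (List.getElem_mem _)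

lemma pvJloop (i k : Nat) (t : Nat → Int) (l : List Nat) (M : List (List Int))
    (hi : i < M.length) (hk : k < (M.getD i []).length) :
    l.foldl (fun M j => pvSetN M i k (pvGetN M i k + t j)) M
      = pvSetN M i k (pvGetN M i k + (l.map t).sum) := by
  induction l generalizing M with
  | nil => simp [pvSetN_self M i k hi hk]
  | cons j rest ih =>
    simp only [List.foldl_cons, List.map_cons, List.sum_cons]
    rw [ih (pvSetN M i k (pvGetN M i k + t j))
      (by rw [pvSetN_length]; exact hi)
      (by rw [pvSetN_getD_self _ _ _ _ hi, List.length_set]; exact hk)]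
    rw [pvGetN_setN_self _ _ _ _ hi hk, pvSetN_setN]
    ring_nf

lemma pvKloop (i : Nat) (u : Nat → Int) (l : List Nat) (M : List (List Int))
    (hi : i < M.length) :
    l.foldl (fun M k => pvSetN M i k (pvGetN M i k + u k)) M
      = M.set i (l.foldl (fun r k => r.set k (r.getD k 0 + u k)) (M.getD i [])) := by
  induction l generalizing M with
  | nil => rw [List.foldl_nil, List.foldl_nil, List.getD_eq_getElem _ [] hi, List.set_getElem_self]
  | cons k rest ih =>
    simp only [List.foldl_cons]
    rw [ih (pvSetN M i k (pvGetN M i k + u k)) (by rw [pvSetN_length]; exact hi)]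
    rw [pvSetN_getD_self _ _ _ _ hi]
    simp only [pvSetN, List.set_set, pvGetN]

lemma pvFoldSetLen {α : Type} (f : Nat → α → α) (d : α) (l : List Nat) (M : List α) :
    (l.foldl (fun M i => M.set i (f i (M.getD i d))) M).length = M.length := by
  induction l generalizing M with
  | nil => rfl
  | cons a t ih => rw [List.foldl_cons, ih, List.length_set]

lemma pvFoldSetGetD {α : Type} (f : Nat → α → α) (d : α) (l : List Nat) (hl : l.Nodup)
    (M : List α) (q : Nat) :
    (l.foldl (fun M i => M.set i (f i (M.getD i d))) M).getD q d =
      if q ∈ l ∧ q < M.length then f q (M.getD q d) else M.getD q d := by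
  induction l generalizing M with
  | nil => simp
  | cons a t ih =>
    rw [List.foldl_cons, ih (List.nodup_cons.mp hl).2]
    simp only [List.length_set, List.mem_cons, List.getD_eq_getElem?_getD]
    by_cases hq : q ∈ t
    · have hqa : a ≠ q := fun h => (List.nodup_cons.mp hl).1 (h ▸ hq)
      rw [List.getElem?_set_ne hqa]
      simp [hq]
    · by_cases hqa : q = a
      · subst hqa
        simp only [hq, or_false, false_and, if_false]
        by_cases hlen : q < M.length
        · rw [List.getElem?_set_self hlen]
          simp [hlen]
        · rw [List.getElem?_eq_none (by simp [le_of_not_gt hlen])]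
          simp [hlen]
      · rw [List.getElem?_set_ne (fun h => hqa h.symm)]
        simp [hq, hqa]

lemma pvAbody_eq (LU : List (List Int)) (N : Nat) (M : List (List Int)) (i k : Nat)
    (h : pvShape N M) (hi : i < N) (hk : k < N) :
    pvAbody LU (i : Int) (k : Int) M = pvSetN M i k (pvGetN M i k + pvVal LU i k) := by
  obtain ⟨hlen, hrows⟩ := h
  have hiM : i < M.length := by omega
  have hrowlen : (M.getD i []).length = N := by
    rw [List.getD_eq_getElem _ [] hiM]; exact hrows _ (List.getElem_mem _)
  have hkM : k < (M.getD i []).length := by omega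
  unfold pvAbody
  rcases Nat.lt_trichotomy i k with hik | hik | hik
  · -- i < k : upper triangular branch
    rw [if_neg (by exact_mod_cast Nat.ne_of_lt hik), if_neg (by exact_mod_cast Nat.not_lt.mpr (Nat.le_of_lt hik))]
    simp only [pvRangeNat, List.foldl_map, Int.toNat_natCast, pvGet2_cast, pvGet2_cast, pvMset_cast]
    rw [pvJloop i k _ _ _ (by rw [pvSetN_length]; exact hiM)
        (by rw [pvSetN_getD_self _ _ _ _ hiM, List.length_set]; exact hkM)]
    rw [pvGetN_setN_self _ _ _ _ hiM hkM, pvSetN_setN]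
    have hmin : min i (k + 1) = i := by omega
    simp only [pvVal, hmin, if_pos (Nat.le_of_lt hik)]
    ring_nf
  · -- i = k : diagonal branch
    subst hik
    rw [if_pos rfl]
    simp only [pvRangeNat, List.foldl_map, Int.toNat_natCast, pvGet2_cast, pvGet2_cast, pvMset_cast]
    rw [pvJloop i i _ _ _ (by rw [pvSetN_length]; exact hiM)
        (by rw [pvSetN_getD_self _ _ _ _ hiM, List.length_set]; exact hkM)]
    rw [pvGetN_setN_self _ _ _ _ hiM hkM, pvSetN_setN]
    have hmin : min i (i + 1) = i := by omega
    simp only [pvVal, hmin, if_pos (Nat.le_refl i)]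
    ring_nf
  · -- i > k : lower triangular branch
    rw [if_neg (by exact_mod_cast Nat.ne_of_gt hik), if_pos (by exact_mod_cast hik)]
    have hcast : ((k : Int) + 1) = ((k + 1 : Nat) : Int) := by push_cast; ring
    rw [hcast]
    simp only [pvRangeNat, List.foldl_map, Int.toNat_natCast, pvGet2_cast, pvGet2_cast, pvMset_cast]
    rw [pvJloop i k _ _ _ hiM hkM]
    have hmin : min i (k + 1) = k + 1 := by omega
    simp only [pvVal, hmin, if_neg (by omega : ¬ i ≤ k)]
    ring_nf

lemma pvKfold (LU : List (List Int)) (N i : Nat) (l : List Nat) (M : List (List Int))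
    (h : pvShape N M) (hi : i < N) (hl : ∀ x ∈ l, x < N) :
    l.foldl (fun M (k : Nat) => pvAbody LU (i : Int) (k : Int) M) M
      = l.foldl (fun M k => pvSetN M i k (pvGetN M i k + pvVal LU i k)) M := by
  induction l generalizing M with
  | nil => rfl
  | cons k t ih =>
    rw [List.foldl_cons, List.foldl_cons,
      pvAbody_eq LU N M i k h hi (hl k (List.mem_cons_self))]
    exact ih _ (pvShape_setN N M i k _ h hi) (fun x hx => hl x (List.mem_cons_of_mem _ hx))

lemma pvShape_rowStep (LU : List (List Int)) (N i : Nat) (M : List (List Int))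
    (h : pvShape N M) (hi : i < N) :
    pvShape N (M.set i (pvRowF LU N i (M.getD i []))) := by
  obtain ⟨h1, h2⟩ := h
  refine ⟨by simp [h1], fun r hr => ?_⟩
  rcases List.mem_or_eq_of_mem_set hr with hr' | rfl
  · exact h2 r hr'
  · show (pvRowF LU N i (M.getD i [])).length = N
    unfold pvRowF
    rw [pvFoldSetLen (fun k x => x + pvVal LU i k) 0]
    rw [List.getD_eq_getElem _ [] (by omega)]
    exact h2 _ (List.getElem_mem _)

lemma pvOuter (LU : List (List Int)) (N : Nat) (l : List Nat) (M : List (List Int))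
    (h : pvShape N M) (hl : ∀ x ∈ l, x < N) :
    l.foldl (fun M (i : Nat) => (List.range N).foldl (fun M (k : Nat) => pvAbody LU (i : Int) (k : Int) M) M) M
      = l.foldl (fun M i => M.set i (pvRowF LU N i (M.getD i []))) M := by
  induction l generalizing M with
  | nil => rfl
  | cons i t ih =>
    have hi : i < N := hl i (List.mem_cons_self)
    rw [List.foldl_cons, List.foldl_cons]
    rw [pvKfold LU N i _ M h hi (fun x hx => List.mem_range.mp hx)]
    rw [pvKloop i _ _ M (by rw [h.1]; exact hi)]
    exact ih _ (pvShape_rowStep LU N i M h hi) (fun x hx => hl x (List.mem_cons_of_mem _ hx))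

lemma pvShape_replicate (N : Nat) : pvShape N (List.replicate N (List.replicate N (0 : Int))) := by
  refine ⟨List.length_replicate, fun r hr => ?_⟩
  rw [List.eq_of_mem_replicate hr, List.length_replicate]

lemma pvA_eq (LU : List (List Int)) (n : Int) :
    UL_mult_COMB LU n
      = (List.range n.toNat).foldl
          (fun M i => M.set i (pvRowF LU n.toNat i (M.getD i [])))
          (List.replicate n.toNat (List.replicate n.toNat (0 : Int))) := by
  unfold UL_mult_COMB
  rw [pvRangeNat]
  simp only [List.foldl_map, List.map_map, Function.comp_def]
  rw [List.map_const', List.length_range, PySem.List.pyRepeat_singleton]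
  exact pvOuter LU n.toNat (List.range n.toNat) _ (pvShape_replicate n.toNat)
    (fun x hx => List.mem_range.mp hx)

-- B-side: entries of the unpacked L and U matrices (as Nat-indexed reads)
lemma pvGetN_mapRange (N : Nat) (f : Nat → Nat → Int) (i j : Nat) (hi : i < N) (hj : j < N) :
    pvGetN ((List.range N).map (fun i => (List.range N).map (fun j => f i j))) i j = f i j := by
  unfold pvGetN
  rw [List.getD_eq_getElem _ [] (by simpa using hi), List.getElem_map, List.getElem_range,
    List.getD_eq_getElem _ 0 (by simpa using hj), List.getElem_map, List.getElem_range]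

lemma pvUnpackL_nat (LU : List (List Int)) (n : Int) :
    pvUnpackL LU n = (List.range n.toNat).map (fun i => (List.range n.toNat).map
        (fun j => if j < i then pvGetN LU i j else if j = i then 1 else 0)) := by
  unfold pvUnpackL
  rw [pvRangeNat]
  simp only [List.map_map, Function.comp_def, pvGet2_cast, Nat.cast_lt, Nat.cast_inj]

lemma pvUnpackU_nat (LU : List (List Int)) (n : Int) :
    pvUnpackU LU n = (List.range n.toNat).map (fun i => (List.range n.toNat).map
        (fun j => if i ≤ j then pvGetN LU i j else 0)) := by
  unfold pvUnpackU
  rw [pvRangeNat]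
  simp only [List.map_map, Function.comp_def, pvGet2_cast, Nat.cast_le]

-- the dense inner product over the full range equals the triangular closed form pvVal
lemma pvDense_eq_val (LU : List (List Int)) (N i k : Nat) (hi : i < N) (hk : k < N) :
    ((List.range N).map (fun j =>
        (if j < i then pvGetN LU i j else if j = i then 1 else 0) *
        (if j ≤ k then pvGetN LU j k else 0))).sum = pvVal LU i k := by
  have hsplit : ∀ j : Nat,
      (if j < i then pvGetN LU i j else if j = i then 1 else 0) *
        (if j ≤ k then pvGetN LU j k else 0)
      = (if j < min i (k + 1) then pvGetN LU i j * pvGetN LU j k else 0)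
        + (if j = i then (if i ≤ k then pvGetN LU i k else 0) else 0) := by
    intro j
    rcases Nat.lt_trichotomy j i with hj | hj | hj
    · by_cases hjk : j ≤ k
      · rw [if_pos hj, if_pos hjk, if_pos (by omega : j < min i (k + 1)), if_neg (by omega : ¬ j = i)]
        ring
      · rw [if_pos hj, if_neg hjk, if_neg (by omega : ¬ j < min i (k + 1)), if_neg (by omega : ¬ j = i)]
        ring
    · subst hj
      rw [if_neg (lt_irrefl j), if_pos rfl, if_neg (by omega : ¬ j < min j (k + 1)), if_pos rfl]
      ring
    · have h1 : ¬ j < i := by omega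
      have h2 : ¬ j = i := by omega
      have h3 : ¬ j < min i (k + 1) := by omega
      rw [if_neg h1, if_neg h2, if_neg h3, if_neg h2]
      ring
  calc ((List.range N).map (fun j =>
          (if j < i then pvGetN LU i j else if j = i then 1 else 0) *
          (if j ≤ k then pvGetN LU j k else 0))).sum
      = ((List.range N).map (fun j =>
          (if j < min i (k + 1) then pvGetN LU i j * pvGetN LU j k else 0)
          + (if j = i then (if i ≤ k then pvGetN LU i k else 0) else 0))).sum := by
        exact congrArg List.sum (List.map_congr_left (fun j _ => hsplit j))
    _ = ((List.range N).map (fun j =>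
          if j < min i (k + 1) then pvGetN LU i j * pvGetN LU j k else 0)).sum
        + ((List.range N).map (fun j =>
          if j = i then (if i ≤ k then pvGetN LU i k else 0) else 0)).sum := by
        rw [← List.sum_map_add]
    _ = pvVal LU i k := by
        have h1 : ((List.range N).map (fun j =>
            if j < min i (k + 1) then pvGetN LU i j * pvGetN LU j k else 0)).sum
            = ((List.range (min i (k + 1))).map (fun j => pvGetN LU i j * pvGetN LU j k)).sum := by
          have hm : min i (k + 1) ≤ N := by omega
          rw [show N = min i (k + 1) + (N - min i (k + 1)) by omega, List.range_add,
            List.map_append, List.sum_append, List.map_map]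
          have hz : (((List.range (N - min i (k + 1))).map
              ((fun j => if j < min i (k + 1) then pvGetN LU i j * pvGetN LU j k else 0)
                ∘ (fun x => min i (k + 1) + x)))).sum = 0 := by
            apply List.sum_eq_zero
            intro x hx
            simp only [List.mem_map, Function.comp_apply] at hx
            obtain ⟨y, _, rfl⟩ := hx
            rw [if_neg (by omega)]
          rw [hz, add_zero]
          exact congrArg List.sum (List.map_congr_left (fun j hj =>
            if_pos (List.mem_range.mp hj)))
        have h2 : ((List.range N).map (fun j =>
            if j = i then (if i ≤ k then pvGetN LU i k else 0) else 0)).sum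
            = (if i ≤ k then pvGetN LU i k else 0) := by
          rw [show N = i + 1 + (N - i - 1) by omega, List.range_add, List.range_succ,
            List.map_append, List.map_append, List.sum_append, List.sum_append, List.map_map]
          have hz1 : (((List.range i).map (fun j =>
              if j = i then (if i ≤ k then pvGetN LU i k else 0) else 0))).sum = 0 := by
            apply List.sum_eq_zero
            intro x hx
            simp only [List.mem_map] at hx
            obtain ⟨y, hy, rfl⟩ := hx
            rw [if_neg (by have := List.mem_range.mp hy; omega)]
          have hz2 : (((List.range (N - i - 1)).map
              ((fun j => if j = i then (if i ≤ k then pvGetN LU i k else 0) else 0)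
                ∘ (fun x => i + 1 + x)))).sum = 0 := by
            apply List.sum_eq_zero
            intro x hx
            simp only [List.mem_map, Function.comp_apply] at hx
            obtain ⟨y, _, rfl⟩ := hx
            rw [if_neg (by omega)]
          rw [hz1, hz2, add_zero, zero_add]
          simp
        rw [h1, h2, pvVal]
        ring

lemma pvB_eq (LU : List (List Int)) (n : Int) :
    UL_mult_COMB_alt LU n
      = (List.range n.toNat).map (fun i => (List.range n.toNat).map (fun k => pvVal LU i k)) := by
  unfold UL_mult_COMB_alt
  rw [pvUnpackL_nat, pvUnpackU_nat, pvRangeNat]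
  simp only [List.map_map, Function.comp_def, pvGet2_cast]
  refine List.map_congr_left (fun i hi => List.map_congr_left (fun k hk => ?_))
  have hiN : i < n.toNat := List.mem_range.mp hi
  have hkN : k < n.toNat := List.mem_range.mp hk
  rw [← pvDense_eq_val LU n.toNat i k hiN hkN]
  refine congrArg List.sum (List.map_congr_left (fun j hj => ?_))
  have hjN : j < n.toNat := List.mem_range.mp hj
  rw [pvGetN_mapRange _ _ i j hiN hjN, pvGetN_mapRange _ _ j k hjN hkN]

lemma pvMain (LU : List (List Int)) (n : Int) : UL_mult_COMB LU n = UL_mult_COMB_alt LU n := by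
  rw [pvA_eq, pvB_eq]
  apply List.ext_getElem
  · rw [pvFoldSetLen (pvRowF LU n.toNat) []]
    simp
  · intro q hq hq'
    have hqN : q < n.toNat := by simpa using hq'
    rw [← List.getD_eq_getElem _ [] hq, ← List.getD_eq_getElem _ [] hq']
    rw [pvFoldSetGetD (pvRowF LU n.toNat) [] _ (List.nodup_range) _ q]
    rw [if_pos ⟨List.mem_range.mpr hqN, by simpa using hqN⟩]
    have hM0 : (List.replicate n.toNat (List.replicate n.toNat (0 : Int))).getD q []
        = List.replicate n.toNat (0 : Int) := by
      rw [List.getD_eq_getElem _ [] (by simpa using hqN), List.getElem_replicate]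
    rw [hM0]
    rw [List.getD_eq_getElem _ [] hq', List.getElem_map, List.getElem_range]
    apply List.ext_getElem
    · unfold pvRowF
      rw [pvFoldSetLen (fun k x => x + pvVal LU q k) 0]
      simp
    · intro p hp hp'
      have hpN : p < n.toNat := by simpa using hp'
      rw [← List.getD_eq_getElem _ 0 hp, ← List.getD_eq_getElem _ 0 hp']
      unfold pvRowF
      rw [pvFoldSetGetD (fun k x => x + pvVal LU q k) 0 _ (List.nodup_range) _ p]
      rw [if_pos ⟨List.mem_range.mpr hpN, by simpa using hpN⟩]
      rw [List.getD_eq_getElem _ 0 (by simpa using hpN), List.getElem_replicate]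
      rw [List.getD_eq_getElem _ 0 hp', List.getElem_map, List.getElem_range]
      ring

-- ===== VERDICT (by name: the statement is the Claim_ definition above) =====
theorem UL_mult_COMB_spec : Claim_equal_UL_mult_COMB := by
  intro LU n _ _
  unfold Spec_UL_mult_COMB
  exact pvMain LU n
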